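-- pv_equiv track=rewrite | github.com/rustyworks/advent-of-code-solution | 2022/05/solution.py | get_crates
-- ===== SOURCE A (Python) =====
-- from typing import List
--
-- def get_crates(crates_and_movements: List[str]) -> List[str]:
--     crates = []
--     for data in crates_and_movements:
--         if data != "":
--             crates.append(data)
--         else:
--             break
--     return crates
-- ===== SOURCE B (Python) =====
-- def get_crates(crates_and_movements):
--     if "" in crates_and_movements:
--         return crates_and_movements[:crates_and_movements.index("")]
--     return crates_and_movements[:]
-- ===== Notes on version B (the rewrite author's own statement) =====
-- stated objective: idiomatic
-- what changed: Replaces the element-by-element append-with-break loop by locating the first empty string with index() and returning a slice up to it (a full copy when no separator exists), maintaining no accumulator.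
import Mathlib
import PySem

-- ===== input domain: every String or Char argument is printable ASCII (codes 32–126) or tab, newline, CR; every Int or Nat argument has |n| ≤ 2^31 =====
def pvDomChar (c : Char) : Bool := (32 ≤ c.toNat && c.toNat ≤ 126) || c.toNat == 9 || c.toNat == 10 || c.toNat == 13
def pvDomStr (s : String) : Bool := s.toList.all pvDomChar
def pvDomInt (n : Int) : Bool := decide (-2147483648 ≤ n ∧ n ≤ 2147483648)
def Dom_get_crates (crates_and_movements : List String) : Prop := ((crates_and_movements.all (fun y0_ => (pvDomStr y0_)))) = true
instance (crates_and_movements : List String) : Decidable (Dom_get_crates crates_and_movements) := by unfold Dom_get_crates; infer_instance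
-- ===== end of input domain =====

-- B replaces A's append-with-break loop by an index()-lookup of the first "" followed by a slice (idiomatic, same cost).


-- ===== PORT A =====
-- loop 'for data: if data != "": append else break', accumulator becomes the cons of this structural recursion
def get_crates (crates_and_movements : List String) : List String :=
  match crates_and_movements with
  | [] => []
  | data :: rest => if data ≠ "" then data :: get_crates rest else []

-- ===== PORT B =====
def get_crates_alt (crates_and_movements : List String) : List String :=
  match PySem.List.index? crates_and_movements "" with
  | some i => PySem.List.slice crates_and_movements none (some (i : Int))
  | none => PySem.List.slice crates_and_movements none none

-- ===== PRECONDITION & SPEC =====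
def Spec_get_crates (crates_and_movements : List String) (out : List String) : Prop := out = get_crates_alt crates_and_movements
instance (crates_and_movements : List String) (out : List String) : Decidable (Spec_get_crates crates_and_movements out) := by unfold Spec_get_crates; infer_instance

-- ===== CLAIM (what is proved, stated in full; the proofs are below) =====
def Claim_equal_get_crates : Prop := ∀ (crates_and_movements : List String), Dom_get_crates crates_and_movements → Spec_get_crates crates_and_movements (get_crates crates_and_movements)

-- ===== LEMMAS AND PROOFS =====
theorem get_crates_eq_alt (l : List String) : get_crates l = get_crates_alt l := by
  induction l with
  | nil => rfl
  | cons d rest ih =>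
    by_cases hd : d = ""
    · subst hd
      have h0 : PySem.List.index? ("" :: rest) "" = some 0 := PySem.List.index?_cons_self _ _
      unfold get_crates get_crates_alt
      rw [h0]
      simp [PySem.List.slice]
    · have hstep : get_crates (d :: rest) = d :: get_crates rest := by simp [get_crates, hd]
      have hidx := PySem.List.index?_cons_of_ne (xs := rest) (v := "") hd
      rw [hstep, ih]
      unfold get_crates_alt
      rw [hidx]
      cases h : PySem.List.index? rest "" with
      | none => simp [PySem.List.slice_none_none]
      | some i =>
        simp only [Option.map_some]
        rw [PySem.List.slice_to_natCast, PySem.List.slice_to_natCast]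
        simp

-- ===== VERDICT (by name: the statement is the Claim_ definition above) =====
theorem get_crates_spec : Claim_equal_get_crates := by
  intro l _
  unfold Spec_get_crates
  exact get_crates_eq_alt l
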